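-- pv_equiv track=rewrite | github.com/Apyre83/expert-system | parse.py | pre_process_rpn
-- ===== SOURCE A (Python) =====
-- def pre_process_rpn(rpn_expression):
--     tokens = list(rpn_expression)
--     processed_tokens = []
--     skip_next = False
--
--     for i, token in enumerate(tokens):
--         if skip_next:
--             skip_next = False
--             continue
--
--         if token == "!":
--             if i + 1 < len(tokens):
--                 processed_tokens.append(tokens[i + 1])
--                 processed_tokens.append(token)
--                 skip_next = True
--             else:
--                 raise ValueError("Expression RPN invalide: '!' à la fin de l'expression")
--         else:
--             processed_tokens.append(token)
--
--     return ''.join(processed_tokens)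
-- ===== SOURCE B (Python) =====
-- def pre_process_rpn(rpn_expression):
--     # Work on the chunks between '!' separators instead of scanning character
--     # by character: each separator moves behind the first character of the
--     # chunk that follows it; an empty chunk means two adjacent '!', which pair
--     # with each other; an empty final chunk is a dangling '!'.
--     parts = rpn_expression.split('!')
--     pieces = [parts[0]]
--     consumed = False
--     for i in range(1, len(parts)):
--         part = parts[i]
--         if consumed:
--             pieces.append(part)
--             consumed = False
--         elif part:
--             pieces.append(part[0] + '!' + part[1:])
--         elif i + 1 < len(parts):
--             pieces.append('!!')
--             consumed = True
--         else:
--             raise ValueError("Expression RPN invalide: '!' à la fin de l'expression")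
--     return ''.join(pieces)
-- ===== Notes on version B (the rewrite author's own statement) =====
-- stated objective: alternative
-- what changed: B splits the string into the chunks between '!' separators and rewrites chunk by chunk (each separator slides behind the first character of the following chunk, an empty chunk pairs two adjacent '!'), replacing A's character-indexed loop with a skip_next flag; Pre_ excludes the inputs with a dangling trailing '!', on which both programs raise the same ValueError.
-- outside the precondition, e.g. on pre_process_rpn('!'): A raises ValueError, B raises ValueError
import Mathlib
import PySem

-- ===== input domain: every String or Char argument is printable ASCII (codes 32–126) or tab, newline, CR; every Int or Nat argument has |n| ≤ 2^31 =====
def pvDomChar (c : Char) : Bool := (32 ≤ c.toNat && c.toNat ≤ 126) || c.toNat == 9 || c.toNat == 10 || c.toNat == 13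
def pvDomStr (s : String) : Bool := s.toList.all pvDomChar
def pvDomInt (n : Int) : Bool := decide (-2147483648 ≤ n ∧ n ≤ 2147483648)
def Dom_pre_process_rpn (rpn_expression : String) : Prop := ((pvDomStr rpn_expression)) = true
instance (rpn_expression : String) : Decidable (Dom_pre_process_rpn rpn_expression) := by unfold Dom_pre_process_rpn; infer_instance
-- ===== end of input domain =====

-- B rewrites by chunks: it splits the string on '!' and slides each separator behind the first
-- character of the following chunk (an empty chunk pairs two adjacent '!'), instead of A's
-- character-indexed loop with a skip_next flag; same cost, a different decomposition.

-- ===== PORT A =====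
-- A's loop over enumerate(tokens) with the skip_next flag; the ValueError branch
-- (token '!' with no successor) returns the accumulator (those inputs are outside Pre_).
def pvLoopA : List Char → Bool → List Char → List Char
  | [], _, acc => acc
  | t :: rest, skip, acc =>
    if skip then pvLoopA rest false acc
    else if t = '!' then
      match rest with
      | nxt :: _ => pvLoopA rest true (acc ++ [nxt, t])
      | [] => acc  -- Python: raise ValueError (excluded by Pre_)
    else pvLoopA rest false (acc ++ [t])

def pre_process_rpn (rpn_expression : String) : String :=
  String.ofList (pvLoopA rpn_expression.toList false [])

-- ===== PORT B =====
-- the 'for i in range(1, len(parts))' loop over the chunks after the first, with the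
-- consumed flag; the raise branch (empty last chunk, unconsumed) returns [] (outside Pre_).
def pvLoopB : List (List Char) → Bool → List (List Char)
  | [], _ => []
  | part :: rest, consumed =>
    if consumed then part :: pvLoopB rest false
    else match part with
      | c :: tail => (c :: '!' :: tail) :: pvLoopB rest false  -- part[0] + '!' + part[1:]
      | [] =>
        if rest ≠ [] then ['!', '!'] :: pvLoopB rest true      -- i + 1 < len(parts)
        else []  -- Python: raise ValueError (excluded by Pre_)

def pre_process_rpn_alt (rpn_expression : String) : String :=
  match PySem.Chars.splitOn rpn_expression.toList ['!'] with
  | [] => ""  -- unreachable: split always yields at least one chunk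
  | p0 :: rest => String.ofList (List.flatten (p0 :: pvLoopB rest false))  -- ''.join(pieces)

-- ===== PRECONDITION & SPEC =====
-- Pre_ excludes exactly the inputs on which A raises ValueError (a dangling trailing '!',
-- i.e. the trailing run of '!' characters has odd length); B raises the same ValueError there.
def Pre_pre_process_rpn (rpn_expression : String) : Prop :=
  ((rpn_expression.toList.reverse.takeWhile (fun c => c == '!')).length) % 2 = 0
instance (rpn_expression : String) : Decidable (Pre_pre_process_rpn rpn_expression) := by
  unfold Pre_pre_process_rpn; infer_instance

def pvWitness_pre_process_rpn : String := "a!bc!!"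

def Spec_pre_process_rpn (rpn_expression : String) (out : String) : Prop := out = pre_process_rpn_alt rpn_expression
instance (rpn_expression : String) (out : String) : Decidable (Spec_pre_process_rpn rpn_expression out) := by unfold Spec_pre_process_rpn; infer_instance

-- ===== CLAIM (what is proved, stated in full; the proofs are below) =====
def Claim_equal_pre_process_rpn : Prop := ∀ (rpn_expression : String), Dom_pre_process_rpn rpn_expression → Pre_pre_process_rpn rpn_expression → Spec_pre_process_rpn rpn_expression (pre_process_rpn rpn_expression)

-- ===== LEMMAS AND PROOFS =====

-- proof-side middle man: the direct pairwise swap recursion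
def pvSwap : List Char → List Char
  | [] => []
  | '!' :: nxt :: rest => nxt :: '!' :: pvSwap rest
  | '!' :: [] => []
  | c :: rest => c :: pvSwap rest

-- proof-side: split on '!' as a plain left-to-right recursion with the current chunk carried
def bsplit : List Char → List Char → List (List Char)
  | pre, [] => [pre]
  | pre, c :: rest => if c = '!' then pre :: bsplit [] rest else bsplit (pre ++ [c]) rest

-- abbreviation used only in proofs: the trailing-'!' run length via takeWhile
def tb (l : List Char) : Nat := (l.reverse.takeWhile (fun c => c == '!')).length

theorem tb_cons_ne (c : Char) (l : List Char) (h : ¬ c = '!') : tb (c :: l) = tb l := by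
  unfold tb
  simp only [List.reverse_cons]
  rw [List.takeWhile_append]
  have hc' : (c == '!') = false := by simp [h]
  have htw : (List.takeWhile (fun c => c == '!') [c]) = [] := by
    simp [List.takeWhile, hc']
  split
  · next hlen => simp [htw, hlen]
  · rfl

theorem tb_cons_bang_cons (x : Char) (l : List Char) :
    tb ('!' :: x :: l) % 2 = tb l % 2 := by
  unfold tb
  simp only [List.reverse_cons, List.append_assoc]
  rw [List.takeWhile_append]
  split
  · next hlen =>
    by_cases hx : x = '!'
    · have h2 : (List.takeWhile (fun c => c == '!') ([x] ++ ['!'])).length = 2 := by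
        simp [List.takeWhile, hx]
      simp only [List.length_append, h2]
      omega
    · have hx' : (x == '!') = false := by simp [hx]
      have h0 : (List.takeWhile (fun c => c == '!') [x, '!']) = [] := by
        simp [List.takeWhile, hx']
      simp [h0, hlen]
  · rfl

theorem loopA_eq_swap : ∀ (n : Nat) (l : List Char), l.length ≤ n → tb l % 2 = 0 →
    ∀ acc, pvLoopA l false acc = acc ++ pvSwap l := by
  intro n
  induction n with
  | zero =>
    intro l hl _ acc
    match l, hl with
    | [], _ => simp [pvLoopA, pvSwap]
  | succ n ih =>
    intro l hl htb acc
    match l with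
    | [] => simp [pvLoopA, pvSwap]
    | c :: rest =>
      by_cases hc : c = '!'
      · subst hc
        match rest with
        | [] =>
          exfalso
          have : tb ['!'] = 1 := by decide
          omega
        | nxt :: rest' =>
          have htb' : tb rest' % 2 = 0 := by
            have := tb_cons_bang_cons nxt rest'
            omega
          have hlen : rest'.length ≤ n := by
            simp [List.length_cons] at hl; omega
          show pvLoopA ('!' :: nxt :: rest') false acc = acc ++ pvSwap ('!' :: nxt :: rest')
          rw [show pvLoopA ('!' :: nxt :: rest') false acc
              = pvLoopA rest' false (acc ++ [nxt, '!']) by simp [pvLoopA]]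
          rw [ih rest' hlen htb' (acc ++ [nxt, '!'])]
          simp [pvSwap]
      · have htb' : tb rest % 2 = 0 := by rw [← tb_cons_ne c rest hc]; exact htb
        have hlen : rest.length ≤ n := by simp [List.length_cons] at hl; omega
        rw [show pvLoopA (c :: rest) false acc = pvLoopA rest false (acc ++ [c]) by
          simp [pvLoopA, hc]]
        rw [ih rest hlen htb' (acc ++ [c])]
        have hswap : pvSwap (c :: rest) = c :: pvSwap rest := by
          cases rest with
          | nil => simp [pvSwap, hc]
          | cons x r => simp [pvSwap, hc]
        rw [hswap]
        simp

-- PySem.Chars.splitOn on the one-char separator '!' IS bsplit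
theorem splitOn_go_eq_bsplit : ∀ (fuel : Nat) (l cur : List Char) (acc : List (List Char)),
    l.length < fuel →
    PySem.Chars.splitOn.go ['!'] fuel l cur acc = acc.reverse ++ bsplit cur.reverse l := by
  intro fuel
  induction fuel with
  | zero => intro l cur acc h; omega
  | succ f ih =>
    intro l cur acc h
    match l with
    | [] => simp [PySem.Chars.splitOn.go, bsplit]
    | c :: rest =>
      by_cases hc : c = '!'
      · subst hc
        have hpre : List.isPrefixOf ['!'] ('!' :: rest) = true := by
          simp [List.isPrefixOf]
        rw [show PySem.Chars.splitOn.go ['!'] (f + 1) ('!' :: rest) cur acc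
            = PySem.Chars.splitOn.go ['!'] f (List.drop 1 ('!' :: rest)) [] (cur.reverse :: acc) by
          simp [PySem.Chars.splitOn.go, hpre]]
        rw [ih (List.drop 1 ('!' :: rest)) [] (cur.reverse :: acc) (by simp at h ⊢; omega)]
        simp [bsplit]
      · have hpre : List.isPrefixOf ['!'] (c :: rest) = false := by
          simp [List.isPrefixOf]
          exact fun h => hc h.symm
        rw [show PySem.Chars.splitOn.go ['!'] (f + 1) (c :: rest) cur acc
            = PySem.Chars.splitOn.go ['!'] f rest (c :: cur) acc by
          simp [PySem.Chars.splitOn.go, hpre]]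
        rw [ih rest (c :: cur) acc (by simp at h ⊢; omega)]
        simp [bsplit, hc]

theorem splitOn_eq_bsplit (l : List Char) :
    PySem.Chars.splitOn l ['!'] = bsplit [] l := by
  unfold PySem.Chars.splitOn
  rw [splitOn_go_eq_bsplit (l.length + 1) l [] [] (by omega)]
  rfl

-- the first chunk of bsplit pre l extends pre
theorem bsplit_head : ∀ (l pre : List Char), ∃ tail parts, bsplit pre l = (pre ++ tail) :: parts := by
  intro l
  induction l with
  | nil => intro pre; exact ⟨[], [], by simp [bsplit]⟩
  | cons c rest ih =>
    intro pre
    by_cases hc : c = '!'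
    · exact ⟨[], bsplit [] rest, by simp [bsplit, hc]⟩
    · obtain ⟨t, p, hp⟩ := ih (pre ++ [c])
      exact ⟨c :: t, p, by simp [bsplit, hc, hp]⟩

-- glue the chunks back: first chunk verbatim, the rest through pvLoopB
def pvGlue : List (List Char) → List Char
  | [] => []
  | p0 :: rest => p0 ++ List.flatten (pvLoopB rest false)

theorem glue_bsplit_eq_swap : ∀ (n : Nat) (l : List Char), l.length ≤ n → tb l % 2 = 0 →
    ∀ pre, pvGlue (bsplit pre l) = pre ++ pvSwap l := by
  intro n
  induction n with
  | zero =>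
    intro l hl _ pre
    match l, hl with
    | [], _ => simp [bsplit, pvGlue, pvLoopB, pvSwap]
  | succ n ih =>
    intro l hl htb pre
    match l with
    | [] => simp [bsplit, pvGlue, pvLoopB, pvSwap]
    | c :: rest =>
      by_cases hc : c = '!'
      · subst hc
        rw [show bsplit pre ('!' :: rest) = pre :: bsplit [] rest by simp [bsplit]]
        match rest with
        | [] =>
          exfalso
          have : tb ['!'] = 1 := by decide
          omega
        | x :: rest' =>
          have hlen : rest'.length ≤ n := by simp [List.length_cons] at hl; omega
          have htb' : tb rest' % 2 = 0 := by
            have := tb_cons_bang_cons x rest'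
            omega
          by_cases hx : x = '!'
          · subst hx
            rw [show bsplit [] ('!' :: rest') = [] :: bsplit [] rest' by simp [bsplit]]
            obtain ⟨t, p, hp⟩ := bsplit_head rest' []
            have hne : bsplit [] rest' ≠ [] := by rw [hp]; simp
            show pvGlue (pre :: [] :: bsplit [] rest') = pre ++ pvSwap ('!' :: '!' :: rest')
            rw [show pvGlue (pre :: [] :: bsplit [] rest')
                = pre ++ List.flatten (pvLoopB ([] :: bsplit [] rest') false) from rfl]
            rw [show pvLoopB ([] :: bsplit [] rest') false
                = ['!', '!'] :: pvLoopB (bsplit [] rest') true by simp [pvLoopB, hne]]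
            have hglue : List.flatten (pvLoopB (bsplit [] rest') true) = pvSwap rest' := by
              rw [hp]
              rw [show pvLoopB (([] ++ t) :: p) true = ([] ++ t) :: pvLoopB p false by
                simp [pvLoopB]]
              have := ih rest' hlen htb' []
              rw [hp] at this
              simpa [pvGlue] using this
            rw [show pvSwap ('!' :: '!' :: rest') = '!' :: '!' :: pvSwap rest' from rfl]
            simp [hglue]
          · rw [show bsplit [] (x :: rest') = bsplit [x] rest' by simp [bsplit, hx]]
            obtain ⟨t, p, hp⟩ := bsplit_head rest' [x]
            have hIH := ih rest' hlen htb' [x]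
            rw [hp] at hIH ⊢
            have hIH' : x :: (t ++ List.flatten (pvLoopB p false)) = x :: pvSwap rest' := by
              simpa [pvGlue] using hIH
            show pvGlue (pre :: (x :: t) :: p) = pre ++ pvSwap ('!' :: x :: rest')
            rw [show pvGlue (pre :: (x :: t) :: p)
                = pre ++ List.flatten (pvLoopB ((x :: t) :: p) false) from rfl]
            rw [show pvLoopB ((x :: t) :: p) false = (x :: '!' :: t) :: pvLoopB p false from rfl]
            rw [show pvSwap ('!' :: x :: rest') = x :: '!' :: pvSwap rest' from rfl]
            simp at hIH'
            simp [hIH']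
      · have hlen : rest.length ≤ n := by simp [List.length_cons] at hl; omega
        have htb' : tb rest % 2 = 0 := by rw [← tb_cons_ne c rest hc]; exact htb
        rw [show bsplit pre (c :: rest) = bsplit (pre ++ [c]) rest by simp [bsplit, hc]]
        rw [ih rest hlen htb' (pre ++ [c])]
        have hswap : pvSwap (c :: rest) = c :: pvSwap rest := by
          cases rest with
          | nil => simp [pvSwap, hc]
          | cons x r => simp [pvSwap, hc]
        simp [hswap]

-- ===== VERDICT (by name: the statement is the Claim_ definition above) =====
theorem pre_process_rpn_spec : Claim_equal_pre_process_rpn := by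
  intro s _ hpre
  unfold Spec_pre_process_rpn pre_process_rpn pre_process_rpn_alt
  have htb : tb s.toList % 2 = 0 := hpre
  rw [splitOn_eq_bsplit]
  obtain ⟨t, p, hp⟩ := bsplit_head s.toList []
  have hglue := glue_bsplit_eq_swap s.toList.length s.toList le_rfl htb []
  rw [hp] at hglue ⊢
  simp only [List.nil_append] at hglue hp ⊢
  rw [loopA_eq_swap s.toList.length s.toList le_rfl htb []]
  simp only [List.nil_append]
  rw [← hglue]
  rfl
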